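-- pv_equiv track=rewrite | github.com/Mei0707/video_translation | backend/main.py | find_continuous_ranges_with_same_mask
-- ===== SOURCE A (Python) =====
-- def find_continuous_ranges_with_same_mask(subtitle_frame_no_box_dict):
--     numbers = sorted(list(subtitle_frame_no_box_dict.keys()))
--     ranges = []
--     start = numbers[0]  # Initial range start value
--     for i in range(1, len(numbers)):
--         # If the current frame number is more than 1 interval from the previous frame number,
--         # the previous interval ends, record the start and end of the current interval
--         if numbers[i] - numbers[i - 1] != 1:
--             end = numbers[i - 1]  # The number is the end of the current continuous interval
--             ranges.append((start, end))
--             start = numbers[i]  # Start the next continuous interval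
--         # If the current frame number is 1 interval from the previous frame number,
--         # but the subtitle box regions differ, the previous interval ends, record the start and end of the current interval
--         elif subtitle_frame_no_box_dict[numbers[i]] != subtitle_frame_no_box_dict[numbers[i - 1]]:
--             end = numbers[i - 1]  # The number is the end of the current continuous interval
--             ranges.append((start, end))
--             start = numbers[i]  # Start the next continuous interval
--     # Add the last interval
--     ranges.append((start, numbers[-1]))
--     return ranges
-- ===== SOURCE B (Python) =====
-- def find_continuous_ranges_with_same_mask(subtitle_frame_no_box_dict):
--     d = subtitle_frame_no_box_dict
--     starts = sorted(n for n in d if n - 1 not in d or d[n - 1] != d[n])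
--     ends = sorted(n for n in d if n + 1 not in d or d[n + 1] != d[n])
--     return list(zip(starts, ends))
-- ===== Notes on version B (the rewrite author's own statement) =====
-- stated objective: alternative
-- what changed: Instead of A's stateful scan over adjacent pairs of the sorted keys, B classifies every key independently by two local dict lookups -- a key is a run start iff n-1 is absent or has a different mask, a run end iff n+1 is absent or has a different mask -- then sorts the starts and the ends and zips them.
import Mathlib
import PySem

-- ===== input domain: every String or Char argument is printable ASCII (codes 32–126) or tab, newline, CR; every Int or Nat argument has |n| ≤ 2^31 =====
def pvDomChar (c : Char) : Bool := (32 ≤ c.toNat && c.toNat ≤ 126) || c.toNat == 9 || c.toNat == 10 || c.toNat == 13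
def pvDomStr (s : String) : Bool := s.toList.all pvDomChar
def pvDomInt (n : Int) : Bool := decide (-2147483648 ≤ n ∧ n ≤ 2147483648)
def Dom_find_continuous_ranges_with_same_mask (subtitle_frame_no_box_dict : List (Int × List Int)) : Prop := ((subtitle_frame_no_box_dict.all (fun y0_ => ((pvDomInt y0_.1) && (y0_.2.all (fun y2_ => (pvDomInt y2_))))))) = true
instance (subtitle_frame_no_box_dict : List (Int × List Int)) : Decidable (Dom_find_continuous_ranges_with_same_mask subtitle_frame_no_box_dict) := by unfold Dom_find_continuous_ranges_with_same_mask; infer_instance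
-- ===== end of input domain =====

-- B classifies each key locally as a run start/end via dict membership instead of scanning adjacent sorted pairs; alternative algorithm, same cost.

-- ===== PORT A =====
-- A's "for i in range(1, len(numbers))" walking numbers[i-1], numbers[i] with state (ranges, start):
-- the obvious structural recursion over the sorted tail, carrying prev = numbers[i-1].
def pvGoA (D : PySem.Dict Int (List Int)) (ranges : List (Int × Int)) (start prev : Int) :
    List Int → List (Int × Int)
  | [] => ranges ++ [(start, prev)]          -- final ranges.append((start, numbers[-1])); prev is numbers[-1]
  | n :: rest =>
    if n - prev ≠ 1 then
      pvGoA D (ranges ++ [(start, prev)]) n n rest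
    else if D.getD n [] ≠ D.getD prev [] then
      pvGoA D (ranges ++ [(start, prev)]) n n rest
    else
      pvGoA D ranges start n rest

def find_continuous_ranges_with_same_mask (subtitle_frame_no_box_dict : List (Int × List Int)) : List (Int × Int) :=
  let D : PySem.Dict Int (List Int) := PySem.Dict.ofList subtitle_frame_no_box_dict
  let numbers := PySem.List.sorted D.keys (fun x => x) false
  match numbers with
  | [] => []                                  -- Python: numbers[0] raises IndexError here (excluded by Pre_)
  | n0 :: rest => pvGoA D [] n0 n0 rest

-- ===== PORT B =====
-- n - 1 not in d or d[n - 1] != d[n]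
def pvIsStart (D : PySem.Dict Int (List Int)) (n : Int) : Bool :=
  !(D.contains (n - 1)) || decide (D.getD (n - 1) [] ≠ D.getD n [])

-- n + 1 not in d or d[n + 1] != d[n]
def pvIsEnd (D : PySem.Dict Int (List Int)) (n : Int) : Bool :=
  !(D.contains (n + 1)) || decide (D.getD (n + 1) [] ≠ D.getD n [])

def find_continuous_ranges_with_same_mask_alt (subtitle_frame_no_box_dict : List (Int × List Int)) : List (Int × Int) :=
  let D : PySem.Dict Int (List Int) := PySem.Dict.ofList subtitle_frame_no_box_dict
  let starts := PySem.List.sorted (D.keys.filter (pvIsStart D)) (fun x => x) false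
  let ends := PySem.List.sorted (D.keys.filter (pvIsEnd D)) (fun x => x) false
  starts.zip ends

-- ===== PRECONDITION & SPEC =====
-- Pre_ excludes only the empty dict, on which A raises IndexError at numbers[0].
def Pre_find_continuous_ranges_with_same_mask (subtitle_frame_no_box_dict : List (Int × List Int)) : Prop :=
  subtitle_frame_no_box_dict ≠ []
instance (subtitle_frame_no_box_dict : List (Int × List Int)) : Decidable (Pre_find_continuous_ranges_with_same_mask subtitle_frame_no_box_dict) := by unfold Pre_find_continuous_ranges_with_same_mask; infer_instance

def pvWitness_find_continuous_ranges_with_same_mask : (List (Int × List Int)) := [(1, [2, 3]), (2, [2, 3]), (5, [])]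

def Spec_find_continuous_ranges_with_same_mask (subtitle_frame_no_box_dict : List (Int × List Int)) (out : List (Int × Int)) : Prop := out = find_continuous_ranges_with_same_mask_alt subtitle_frame_no_box_dict
instance (subtitle_frame_no_box_dict : List (Int × List Int)) (out : List (Int × Int)) : Decidable (Spec_find_continuous_ranges_with_same_mask subtitle_frame_no_box_dict out) := by unfold Spec_find_continuous_ranges_with_same_mask; infer_instance

-- ===== CLAIM (what is proved, stated in full; the proofs are below) =====
def Claim_equal_find_continuous_ranges_with_same_mask : Prop := ∀ (subtitle_frame_no_box_dict : List (Int × List Int)), Dom_find_continuous_ranges_with_same_mask subtitle_frame_no_box_dict → Pre_find_continuous_ranges_with_same_mask subtitle_frame_no_box_dict → Spec_find_continuous_ranges_with_same_mask subtitle_frame_no_box_dict (find_continuous_ranges_with_same_mask subtitle_frame_no_box_dict)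

-- ===== LEMMAS AND PROOFS =====

-- the break condition between adjacent sorted keys, as A's loop tests it
def pvBrk (D : PySem.Dict Int (List Int)) (p : Int × Int) : Bool :=
  decide (p.2 - p.1 ≠ 1) || decide (D.getD p.1 [] ≠ D.getD p.2 [])

-- A's loop, started after prefix `ranges` with current range open at `start` and previous key `prev`,
-- produces the zip of (start :: break seconds) with (break firsts ++ [last key]).
theorem pvGoA_eq (D : PySem.Dict Int (List Int)) (rest : List Int) :
    ∀ (ranges : List (Int × Int)) (start prev : Int),
      pvGoA D ranges start prev rest =
        ranges ++
          (start :: (((prev :: rest).zip rest).filter (pvBrk D)).map Prod.snd).zip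
            ((((prev :: rest).zip rest).filter (pvBrk D)).map Prod.fst ++
              [(prev :: rest).getLast (List.cons_ne_nil prev rest)]) := by
  induction rest with
  | nil => intro ranges start prev; simp [pvGoA]
  | cons n rest ih =>
    intro ranges start prev
    by_cases h1 : n - prev ≠ 1
    · have hb : pvBrk D (prev, n) = true := by simp [pvBrk]; omega
      simp only [pvGoA, if_pos h1, List.zip_cons_cons, List.filter_cons, hb, if_pos,
        List.map_cons, List.zip_cons_cons, List.getLast_cons (List.cons_ne_nil n rest)]
      rw [ih]
      simp
    · by_cases h2 : D.getD n [] ≠ D.getD prev []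
      · have hb : pvBrk D (prev, n) = true := by
          simp only [pvBrk, Bool.or_eq_true, decide_eq_true_eq]
          exact Or.inr (fun h => h2 h.symm)
        simp only [pvGoA, if_neg h1, if_pos h2, List.zip_cons_cons, List.filter_cons, hb, if_pos,
          List.map_cons, List.getLast_cons (List.cons_ne_nil n rest)]
        rw [ih]
        simp
      · simp only [ne_eq, not_not] at h1 h2
        have hb : pvBrk D (prev, n) = false := by simp [pvBrk, h1, h2]
        rw [show pvGoA D ranges start prev (n :: rest) = pvGoA D ranges start n rest from by
              simp [pvGoA, h1, h2], ih]
        simp [hb, List.getLast_cons (List.cons_ne_nil n rest)]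

-- sorting commutes with filtering when the sorted list is strictly increasing
theorem pvSortedFilter (xs : List Int) (p : Int → Bool)
    (hpw : (PySem.List.sorted xs (fun x => x) false).Pairwise (· < ·)) :
    PySem.List.sorted (xs.filter p) (fun x => x) false
      = (PySem.List.sorted xs (fun x => x) false).filter p := by
  apply PySem.List.sorted_eq_of_perm_of_pairwise_lt
  · exact (PySem.List.sorted_perm xs (fun x => x) false).filter p
  · exact hpw.filter p

-- B's local tests, on the sorted key tail after `prev`, produce exactly the break seconds / firsts.
theorem pvTail (D : PySem.Dict Int (List Int)) :
    ∀ (rest : List Int) (prev : Int),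
      (∀ m : Int, D.contains m = true → m ≤ prev ∨ m ∈ rest) →
      (∀ m ∈ prev :: rest, D.contains m = true) →
      (prev :: rest).Pairwise (· < ·) →
      rest.filter (pvIsStart D) = (((prev :: rest).zip rest).filter (pvBrk D)).map Prod.snd
      ∧ (prev :: rest).filter (pvIsEnd D) =
          (((prev :: rest).zip rest).filter (pvBrk D)).map Prod.fst
            ++ [(prev :: rest).getLast (List.cons_ne_nil prev rest)] := by
  intro rest
  induction rest with
  | nil =>
    intro prev hup hin hpw
    have hc : D.contains (prev + 1) = false := by
      by_contra h
      rcases hup (prev + 1) (by simpa using h) with h' | h'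
      · omega
      · simp at h'
    have hE : pvIsEnd D prev = true := by simp [pvIsEnd, hc]
    refine ⟨rfl, ?_⟩
    simp [hE]
  | cons b rest ih =>
    intro prev hup hin hpw
    have hab : prev < b := (List.pairwise_cons.mp hpw).1 b (by simp)
    have hrest : ∀ m ∈ rest, b < m := (List.pairwise_cons.mp (List.pairwise_cons.mp hpw).2).1
    -- adjacency-membership facts
    have hS : pvIsStart D b = pvBrk D (prev, b) := by
      by_cases h1 : b - prev = 1
      · have hpe : b - 1 = prev := by omega
        have hc : D.contains prev = true := hin prev (by simp)
        simp [pvIsStart, pvBrk, hpe, hc, h1]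
      · have hc : D.contains (b - 1) = false := by
          by_contra h
          rcases hup (b - 1) (by simpa using h) with h' | h'
          · omega
          · rcases List.mem_cons.mp h' with h'' | h''
            · omega
            · have := hrest _ h''; omega
        simp [pvIsStart, pvBrk, hc, h1]
    have hE : pvIsEnd D prev = pvBrk D (prev, b) := by
      by_cases h1 : b - prev = 1
      · have hpe : prev + 1 = b := by omega
        have hc : D.contains b = true := hin b (by simp)
        by_cases hg : D.getD prev [] = D.getD b []
        · simp [pvIsEnd, pvBrk, hpe, hc, h1, hg]
        · simp [pvIsEnd, pvBrk, hpe, hc, h1, hg, Ne.symm hg]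
      · have hc : D.contains (prev + 1) = false := by
          by_contra h
          rcases hup (prev + 1) (by simpa using h) with h' | h'
          · omega
          · rcases List.mem_cons.mp h' with h'' | h''
            · omega
            · have := hrest _ h''; omega
        simp [pvIsEnd, pvBrk, hc, h1]
    -- inductive hypothesis for prev := b
    have hup' : ∀ m : Int, D.contains m = true → m ≤ b ∨ m ∈ rest := by
      intro m hm
      rcases hup m hm with h' | h'
      · left; omega
      · rcases List.mem_cons.mp h' with h'' | h''
        · left; omega
        · right; exact h''
    have hin' : ∀ m ∈ b :: rest, D.contains m = true := fun m hm => hin m (by simp [List.mem_cons.mp hm])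
    obtain ⟨ihS, ihE⟩ := ih b hup' hin' (List.pairwise_cons.mp hpw).2
    constructor
    · rw [List.filter_cons, ihS]
      cases hbk : pvBrk D (prev, b) <;>
        simp [List.zip_cons_cons, hbk, hS.trans hbk]
    · rw [List.filter_cons, ihE]
      cases hbk : pvBrk D (prev, b) <;>
        simp [List.zip_cons_cons, hbk, hE.trans hbk,
          List.getLast_cons (List.cons_ne_nil b rest)]

-- ===== VERDICT (by name: the statement is the Claim_ definition above) =====
theorem find_continuous_ranges_with_same_mask_spec : Claim_equal_find_continuous_ranges_with_same_mask := by
  intro d _ _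
  show find_continuous_ranges_with_same_mask d = find_continuous_ranges_with_same_mask_alt d
  simp only [find_continuous_ranges_with_same_mask, find_continuous_ranges_with_same_mask_alt]
  set D := PySem.Dict.ofList d with hD
  have hndk : D.keys.Nodup := PySem.Dict.nodup_keys_ofList d
  have hperm := PySem.List.sorted_perm D.keys (fun x => x) false
  have hnd : (PySem.List.sorted D.keys (fun x => x) false).Nodup := hperm.nodup_iff.mpr hndk
  have hle := PySem.List.sorted_pairwise D.keys (fun x => x)
  have hpw : (PySem.List.sorted D.keys (fun x => x) false).Pairwise (· < ·) :=
    (hle.and hnd).imp (fun h => lt_of_le_of_ne h.1 h.2)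
  have hmem : ∀ m : Int, D.contains m = true ↔ m ∈ PySem.List.sorted D.keys (fun x => x) false := by
    intro m
    rw [PySem.Dict.contains_iff_mem_keys, PySem.List.mem_sorted]
  rw [pvSortedFilter D.keys (pvIsStart D) hpw, pvSortedFilter D.keys (pvIsEnd D) hpw]
  cases hks : PySem.List.sorted D.keys (fun x => x) false with
  | nil => simp
  | cons n0 rest =>
    rw [hks] at hpw hmem
    have hS0 : pvIsStart D n0 = true := by
      have hc : D.contains (n0 - 1) = false := by
        by_contra h
        have := (hmem (n0 - 1)).mp (by simpa using h)
        rcases List.mem_cons.mp this with h' | h'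
        · omega
        · have := (List.pairwise_cons.mp hpw).1 _ h'; omega
      simp [pvIsStart, hc]
    obtain ⟨hS, hE⟩ := pvTail D rest n0
      (fun m hm => by
        rcases List.mem_cons.mp ((hmem m).mp hm) with h' | h'
        · left; omega
        · right; exact h')
      (fun m hm => (hmem m).mpr hm) hpw
    rw [List.filter_cons, if_pos hS0, hS, hE]
    show pvGoA D [] n0 n0 rest = _
    rw [pvGoA_eq]
    simp
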